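-- pv_equiv track=rewrite | github.com/chrosta/gedit-intelligent-words-completion | gedit4/intelligent_words_completion.py | _check_prefix
-- ===== SOURCE A (Python) =====
-- def _check_prefix(prefix):
--     flag = True
--     if len(prefix) > 0:
--         prefix = prefix.split("_")
--         for part in prefix:
--             if len(part) > 0:
--                 if flag:
--                     flag = part.isalnum()
--     return flag
-- ===== SOURCE B (Python) =====
-- def _check_prefix(prefix):
--     for c in prefix:
--         if not (c.isalnum() or c == '_'):
--             return False
--     return True
-- ===== Notes on version B (the rewrite author's own statement) =====
-- stated objective: simpler
-- what changed: B drops the underscore split and the parts loop entirely and scans the string once, character by character, accepting only alphanumeric characters and underscores with an early return on the first offender.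
import Mathlib
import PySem

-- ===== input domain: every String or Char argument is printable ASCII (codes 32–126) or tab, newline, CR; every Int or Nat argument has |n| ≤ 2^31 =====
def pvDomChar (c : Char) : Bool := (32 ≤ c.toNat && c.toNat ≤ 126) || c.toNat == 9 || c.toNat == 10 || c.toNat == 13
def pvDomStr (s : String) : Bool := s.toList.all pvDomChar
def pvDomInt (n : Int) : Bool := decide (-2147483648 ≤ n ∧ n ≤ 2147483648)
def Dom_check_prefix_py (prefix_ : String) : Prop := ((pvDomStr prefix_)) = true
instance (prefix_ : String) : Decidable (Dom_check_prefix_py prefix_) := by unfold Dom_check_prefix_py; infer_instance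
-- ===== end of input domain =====

-- B replaces A's underscore split and parts loop by a single character scan (alnum or underscore): simpler, same result.
-- ===== PORT A =====
-- literal transliteration of A: split on "_", check each nonempty part with isalnum while flag holds
def check_prefix_py (prefix_ : String) : Bool :=
  if PySem.Str.len prefix_ > 0 then
    let parts : List (List Char) := PySem.Chars.splitOn prefix_.toList ['_']
    parts.foldl
      (fun flag part =>
        if part.length > 0 then
          (if flag then PySem.Chars.strIsalnum part else flag)
        else flag)
      true
  else true

-- ===== PORT B =====
-- literal transliteration of B: one character scan, alnum or underscore
def check_prefix_py_alt (prefix_ : String) : Bool :=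
  prefix_.toList.all (fun c => PySem.Chars.isalnum c || c == '_')

-- ===== PRECONDITION & SPEC =====
def Spec_check_prefix_py (prefix_ : String) (out : Bool) : Prop := out = check_prefix_py_alt prefix_
instance (prefix_ : String) (out : Bool) : Decidable (Spec_check_prefix_py prefix_ out) := by unfold Spec_check_prefix_py; infer_instance

-- ===== CLAIM (what is proved, stated in full; the proofs are below) =====
def Claim_equal_check_prefix_py : Prop := ∀ (prefix_ : String), Dom_check_prefix_py prefix_ → Spec_check_prefix_py prefix_ (check_prefix_py prefix_)

-- ===== LEMMAS AND PROOFS =====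

-- ===== VERDICT (by name: the statement is the Claim_ definition above) =====
-- split on the single character '_' stated as structural recursion
def splitChar : List Char → List Char → List (List Char)
  | [], cur => [cur.reverse]
  | c :: rest, cur =>
      if c = '_' then cur.reverse :: splitChar rest []
      else splitChar rest (c :: cur)

theorem go_eq (l : List Char) : ∀ (fuel : Nat) (cur : List Char) (acc : List (List Char)),
    l.length ≤ fuel →
    PySem.Chars.splitOn.go ['_'] fuel l cur acc = acc.reverse ++ splitChar l cur := by
  induction l with
  | nil =>
      intro fuel cur acc _
      cases fuel <;> simp [PySem.Chars.splitOn.go, splitChar]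
  | cons c rest ih =>
      intro fuel cur acc h
      cases fuel with
      | zero => simp at h
      | succ n =>
        simp only [PySem.Chars.splitOn.go, List.isPrefixOf, List.isPrefixOf_nil_left,
          Bool.and_true, List.length_cons, List.length_nil, Nat.zero_add, List.drop_one, List.tail_cons]
        by_cases hc : c = '_'
        · subst hc
          rw [if_pos (by simp)]
          rw [ih n [] (cur.reverse :: acc) (Nat.le_of_succ_le_succ h)]
          simp [splitChar]
        · rw [if_neg (by simp [beq_iff_eq]; exact fun h' => hc h'.symm)]
          rw [ih n (c :: cur) acc (Nat.le_of_succ_le_succ h)]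
          simp [splitChar, hc]

-- the loop body of A, rewritten pointwise: empty parts keep flag, nonempty parts demand isalnum
theorem stepA_eq :
    (fun (flag : Bool) (part : List Char) =>
        if part.length > 0 then (if flag then PySem.Chars.strIsalnum part else flag) else flag)
      = fun (flag : Bool) (part : List Char) => flag && part.all PySem.Chars.isalnum := by
  funext flag part
  cases part <;> cases flag <;> simp [PySem.Chars.strIsalnum]

theorem fold_splitChar (l : List Char) : ∀ (cur : List Char) (flag : Bool),
    List.foldl (fun (flag : Bool) (part : List Char) => flag && part.all PySem.Chars.isalnum)
      flag (splitChar l cur)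
    = (flag && cur.all PySem.Chars.isalnum
        && l.all (fun c => PySem.Chars.isalnum c || c == '_')) := by
  induction l with
  | nil =>
      intro cur flag
      simp [splitChar, List.all_reverse]
  | cons c rest ih =>
      intro cur flag
      by_cases hc : c = '_'
      · subst hc
        rw [show splitChar ('_' :: rest) cur = cur.reverse :: splitChar rest [] from by
          simp [splitChar]]
        rw [List.foldl_cons, ih]
        simp [List.all_reverse, Bool.and_assoc]
      · simp only [splitChar, if_neg hc]
        rw [ih]
        have hb : (c == '_') = false := by simpa using hc
        simp only [List.all_cons, hb, Bool.or_false]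
        cases flag <;> cases hca : PySem.Chars.isalnum c <;>
          simp [Bool.and_assoc, Bool.and_comm, Bool.and_left_comm]

theorem ports_agree (prefix_ : String) : check_prefix_py prefix_ = check_prefix_py_alt prefix_ := by
  unfold check_prefix_py check_prefix_py_alt
  by_cases h : PySem.Str.len prefix_ > 0
  · rw [if_pos h]
    have hs : PySem.Chars.splitOn prefix_.toList ['_'] = splitChar prefix_.toList [] := by
      unfold PySem.Chars.splitOn
      exact go_eq _ _ _ _ (Nat.le_succ _)
    rw [hs, stepA_eq, fold_splitChar]
    simp
  · rw [if_neg h]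
    have : prefix_.toList = [] := by
      simpa [PySem.Str.len, PySem.Chars.len] using h
    simp [this]

-- ===== VERDICT =====
theorem check_prefix_py_spec : Claim_equal_check_prefix_py := by
  intro p _
  unfold Spec_check_prefix_py
  exact ports_agree p
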